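-- pv_equiv track=rewrite | github.com/nfragakis/NLP-Knowledge-Extraction | model_class.py | process_triplets
-- ===== SOURCE A (Python) =====
-- from collections import defaultdict
--
-- def process_triplets(triplets):
--   """
--   loop through triplets append non-empty results
--   choose highest confidence product, response
--   pair for all responses
--   """
--   final_triplets = []
--   answers = defaultdict(list)
--
--   for trip in triplets:
--       if trip[2] != '': answers[trip[2]].append(trip)
--
--   # remove duplicate answers
--   for ans in answers.keys():
--       final_triplets.append(sorted(
--           answers[ans], key=lambda x: x[2],
--           reverse=True)[0:3][0]
--                             )
--   return final_triplets
-- ===== SOURCE B (Python) =====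
-- def process_triplets(triplets):
--     seen = set()
--     result = []
--     for trip in triplets:
--         ans = trip[2]
--         if ans != '' and ans not in seen:
--             seen.add(ans)
--             result.append(trip)
--     return result
-- ===== Notes on version B (the rewrite author's own statement) =====
-- stated objective: simpler
-- what changed: Replaces A's defaultdict grouping plus a second loop over keys with a reverse-sort of each group by a single pass keeping a set of already-emitted answers and appending the first triplet per non-empty answer.
import Mathlib
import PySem

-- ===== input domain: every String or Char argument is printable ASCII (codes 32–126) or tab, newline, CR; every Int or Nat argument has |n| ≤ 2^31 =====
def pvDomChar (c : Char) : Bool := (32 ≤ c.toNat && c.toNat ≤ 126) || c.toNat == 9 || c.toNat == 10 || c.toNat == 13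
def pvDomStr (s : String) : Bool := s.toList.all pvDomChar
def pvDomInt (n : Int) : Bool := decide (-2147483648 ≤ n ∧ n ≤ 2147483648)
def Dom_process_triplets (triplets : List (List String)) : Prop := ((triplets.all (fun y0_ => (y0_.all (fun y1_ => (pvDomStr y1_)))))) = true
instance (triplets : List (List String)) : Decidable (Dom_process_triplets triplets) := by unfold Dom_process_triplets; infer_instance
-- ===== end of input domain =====

-- B replaces A's group-by-answer dict, second loop over keys and pointless reverse-sort
-- by one pass that keeps the first triplet per non-empty answer (objective: simpler).

-- ===== PORT A =====
-- trip[2]; the default "" is never reached under Pre_ (every trip has length ≥ 3)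
def pvKeyA (trip : List String) : String := PySem.List.pyGetD trip 2 ""

-- sorted(answers[ans], key=lambda x: x[2], reverse=True)[0:3][0]; the pyGetD default []
-- is never reached: every group in answers is nonempty
def pvChoose (g : List (List String)) : List String :=
  PySem.List.pyGetD (PySem.List.slice (PySem.List.sorted g pvKeyA true) (some 0) (some 3)) 0 []

def process_triplets (triplets : List (List String)) : List (List String) :=
  let answers : PySem.Dict String (List (List String)) :=
    triplets.foldl (fun d trip =>
      if pvKeyA trip ≠ "" then d.modify (pvKeyA trip) [] (fun g => g ++ [trip]) else d)
      PySem.Dict.empty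
  answers.keys.foldl (fun out ans => out ++ [pvChoose (answers.getD ans [])]) []

-- ===== PORT B =====
-- trip[2]; same remark as for A's helper
def pvKeyB (trip : List String) : String := PySem.List.pyGetD trip 2 ""

def process_triplets_alt (triplets : List (List String)) : List (List String) :=
  (triplets.foldl (fun (st : PySem.Set String × List (List String)) trip =>
      if pvKeyB trip ≠ "" ∧ PySem.Set.contains st.1 (pvKeyB trip) = false then
        (PySem.Set.add st.1 (pvKeyB trip), st.2 ++ [trip])
      else st)
    (PySem.Set.empty, [])).2

-- ===== PRECONDITION & SPEC =====
-- Pre_ excludes exactly the inputs where Python A raises IndexError (some trip[2] missing).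
def Pre_process_triplets (triplets : List (List String)) : Prop :=
  ∀ trip ∈ triplets, 3 ≤ trip.length
instance (triplets : List (List String)) : Decidable (Pre_process_triplets triplets) := by
  unfold Pre_process_triplets; infer_instance

def pvWitness_process_triplets : List (List String) := [["a", "b", "c"], ["d", "e", "c"]]

def Spec_process_triplets (triplets : List (List String)) (out : List (List String)) : Prop := out = process_triplets_alt triplets
instance (triplets : List (List String)) (out : List (List String)) : Decidable (Spec_process_triplets triplets out) := by unfold Spec_process_triplets; infer_instance

-- ===== CLAIM (what is proved, stated in full; the proofs are below) =====
def Claim_equal_process_triplets : Prop := ∀ (triplets : List (List String)), Dom_process_triplets triplets → Pre_process_triplets triplets → Spec_process_triplets triplets (process_triplets triplets)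

-- ===== LEMMAS AND PROOFS =====

-- reverse-sorting a list whose keys are all equal leaves it unchanged (stability)
lemma pv_foldl_insertBy_const (a : String) (g acc : List (List String))
    (hg : ∀ u ∈ g, pvKeyA u = a) (hacc : ∀ u ∈ acc, pvKeyA u = a) :
    g.foldl (fun acc x => PySem.List.insertBy (fun p q => decide (pvKeyA q < pvKeyA p)) x acc) acc
      = acc ++ g := by
  induction g generalizing acc with
  | nil => simp
  | cons t ts ih =>
    have ht : pvKeyA t = a := hg t (by simp)
    rw [List.foldl_cons,
      PySem.List.insertBy_of_forall_not_before _ _ _ (by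
        intro y hy
        have := hacc y hy
        simp [this, ht]),
      ih (acc ++ [t]) (fun u hu => hg u (by simp [hu])) (by
        intro u hu
        rcases List.mem_append.mp hu with h | h
        · exact hacc u h
        · simp at h; subst h; exact ht)]
    simp

lemma pv_sorted_rev_const (a : String) (g : List (List String))
    (hg : ∀ u ∈ g, pvKeyA u = a) :
    PySem.List.sorted g pvKeyA true = g := by
  rw [PySem.List.sorted_rev_eq_foldl_insertBy]
  simpa using pv_foldl_insertBy_const a g [] hg (by simp)

lemma pv_choose_cons (a : String) (t : List String) (ts : List (List String))
    (h : ∀ u ∈ t :: ts, pvKeyA u = a) :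
    pvChoose (t :: ts) = t := by
  unfold pvChoose
  rw [pv_sorted_rev_const a _ h,
    PySem.List.slice_toNat _ (by norm_num) (by norm_num)]
  simp [PySem.List.pyGetD_zero]

-- the invariant-carrying induction relating A's grouped dict to B's (seen, result) pass
lemma pv_main (l : List (List String)) (d : PySem.Dict String (List (List String)))
    (seen : PySem.Set String) (out : List (List String))
    (hseen : seen = d.keys)
    (hgrp : ∀ ans ∈ d.keys, d.getD ans [] ≠ [] ∧ ∀ u ∈ d.getD ans [], pvKeyA u = ans)
    (hout : out = d.keys.map (fun ans => pvChoose (d.getD ans []))) :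
    ((l.foldl (fun d trip =>
        if pvKeyA trip ≠ "" then d.modify (pvKeyA trip) [] (fun g => g ++ [trip]) else d) d).keys.map
      (fun ans => pvChoose ((l.foldl (fun d trip =>
        if pvKeyA trip ≠ "" then d.modify (pvKeyA trip) [] (fun g => g ++ [trip]) else d) d).getD ans [])))
    = (l.foldl (fun (st : PySem.Set String × List (List String)) trip =>
        if pvKeyB trip ≠ "" ∧ PySem.Set.contains st.1 (pvKeyB trip) = false then
          (PySem.Set.add st.1 (pvKeyB trip), st.2 ++ [trip])
        else st) (seen, out)).2 := by
  induction l generalizing d seen out with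
  | nil => simp [hout]
  | cons t l ih =>
    simp only [List.foldl_cons]
    by_cases hk : pvKeyA t = ""
    · rw [if_neg (by simp [hk]), if_neg (by simp [pvKeyB, pvKeyA] at hk ⊢; simp [hk])]
      exact ih d seen out hseen hgrp hout
    · rw [if_pos hk]
      have hkB : pvKeyB t = pvKeyA t := rfl
      by_cases hm : pvKeyA t ∈ d.keys
      · -- already-seen answer: A appends into the group, B skips
        have hmem : pvKeyA t ∈ seen := by rw [hseen]; exact hm
        rw [if_neg (by simp [pvKeyB, pvKeyA] at hmem ⊢; intro _; exact hmem)]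
        have hdc : d.contains (pvKeyA t) = true := by
          rw [PySem.Dict.contains_eq_decide_mem_keys]; simpa using hm
        have hkeys : (d.modify (pvKeyA t) [] (fun g => g ++ [t])).keys = d.keys := by
          rw [PySem.Dict.keys_modify, PySem.Dict.keys_insert_of_contains _ _ hdc]
        refine ih _ seen out (by rw [hkeys, hseen]) ?_ ?_
        · intro ans hans
          rw [hkeys] at hans
          rw [PySem.Dict.getD_modify]
          obtain ⟨hne, hall⟩ := hgrp ans hans
          split_ifs with he
          · subst he
            constructor
            · simp
            · intro u hu
              rcases List.mem_append.mp hu with h | h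
              · exact hall u h
              · simp at h; subst h; rfl
          · exact ⟨hne, hall⟩
        · rw [hout, hkeys]
          apply List.map_congr_left
          intro ans hans
          rw [PySem.Dict.getD_modify]
          split_ifs with he
          · subst he
            obtain ⟨hne, hall⟩ := hgrp _ hans
            obtain ⟨u, us, hg⟩ := List.exists_cons_of_ne_nil hne
            rw [hg]
            rw [hg] at hall
            have hall' : ∀ v ∈ u :: (us ++ [t]), pvKeyA v = pvKeyA t := by
              intro v hv
              rcases List.mem_cons.mp hv with h | h
              · exact hall v (h ▸ List.mem_cons_self)
              · rcases List.mem_append.mp h with h' | h'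
                · exact hall v (List.mem_cons_of_mem _ h')
                · simp at h'; subst h'; rfl
            rw [show u :: us ++ [t] = u :: (us ++ [t]) by simp,
              pv_choose_cons (pvKeyA t) _ _ hall', pv_choose_cons (pvKeyA t) _ _ hall]
          · rfl
      · -- new answer: A opens a fresh group, B emits the triplet
        have hnm : pvKeyA t ∉ seen := by rw [hseen]; exact hm
        have hcont : PySem.Set.contains seen (pvKeyA t) = false := by
          simp [PySem.Set.contains]; exact hnm
        rw [if_pos ⟨by simpa [hkB] using hk, by rw [hkB]; exact hcont⟩]
        have hdc : d.contains (pvKeyA t) = false := by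
          rw [PySem.Dict.contains_eq_decide_mem_keys]; simpa using hm
        have hgd : d.getD (pvKeyA t) [] = [] := PySem.Dict.getD_of_not_contains _ _ hdc
        have hkeys : (d.modify (pvKeyA t) [] (fun g => g ++ [t])).keys = d.keys ++ [pvKeyA t] := by
          rw [PySem.Dict.keys_modify, PySem.Dict.keys_insert_of_not_contains _ _ hdc]
        have hadd : PySem.Set.add seen (pvKeyB t) = d.keys ++ [pvKeyA t] := by
          simp [PySem.Set.add, hkB, hseen]; exact hm
        refine ih _ _ _ (by rw [hadd, hkeys]) ?_ ?_
        · intro ans hans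
          rw [hkeys] at hans
          rw [PySem.Dict.getD_modify]
          split_ifs with he
          · subst he
            rw [hgd]
            exact ⟨by simp, by intro u hu; simp at hu; subst hu; rfl⟩
          · rcases List.mem_append.mp hans with h | h
            · exact hgrp ans h
            · simp at h; exact absurd h he
        · rw [hout, hkeys, List.map_append]
          congr 1
          · apply List.map_congr_left
            intro ans hans
            rw [PySem.Dict.getD_modify, if_neg (by rintro rfl; exact hm hans)]
          · simp only [List.map_cons, List.map_nil]
            rw [PySem.Dict.getD_modify, if_pos rfl, hgd, List.nil_append,
              pv_choose_cons (pvKeyA t) t [] (by intro u hu; simp at hu; subst hu; rfl)]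

-- ===== VERDICT (by name: the statement is the Claim_ definition above) =====
theorem process_triplets_spec : Claim_equal_process_triplets := by
  intro triplets _ _
  unfold Spec_process_triplets process_triplets process_triplets_alt
  simp only
  rw [PySem.List.foldl_append_singleton_eq_map]
  simpa using pv_main triplets PySem.Dict.empty PySem.Set.empty []
    (by simp [PySem.Set.empty]) (by simp) (by simp)
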